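-- pv_equiv track=rewrite | github.com/airelabsresearch/teaml | src/teaml/formula/tea_parser.py | filter_bases
-- ===== SOURCE A (Python) =====
-- def filter_bases(data):
--     """
--     For {'a.b.c': 50, 'a.b.z': 4, 'a':None}
--     Return {'a.b.c': 50, 'a.b.z': 4}
--
--     For {'a.b.c': 50, 'a.b.z': 4, 'a':None, 'a.b': None}
--     Return {'a.b.c': 50, 'a.b.z': 4}
--
--     For {'a':1, 'b':2}
--     Return {'a':1, 'b':2}
--     """
--     dotted = [k for k in data if '.' in k]
--     # Chop off the last part of the dotted keys
--     bases = []
--     for k in dotted: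
--         # Ignore the last part, that will be the key
--         parts = k.split('.')[:-1]
--         # Add all the prefix levels
--         while parts:
--             bases.append('.'.join(parts))
--             parts.pop()
--     result = {k: data[k] for k in data if k not in bases}
--     return result
-- ===== SOURCE B (Python) =====
-- def filter_bases(data):
--     """
--     For {'a.b.c': 50, 'a.b.z': 4, 'a':None}
--     Return {'a.b.c': 50, 'a.b.z': 4}
--     """
--     dotted = [o for o in data if '.' in o]
--     return {k: v for k, v in data.items()
--             if not any(o.startswith(k + '.') for o in dotted)}
-- ===== Notes on version B (the rewrite author's own statement) =====
-- stated objective: simpler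
-- what changed: Drops A's two-phase scheme (enumerate every dotted ancestor prefix of every key via split/join/pop into a bases list, then filter by list membership) in favour of a direct filter keeping k iff no dotted key starts with k + '.'.
import Mathlib
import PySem

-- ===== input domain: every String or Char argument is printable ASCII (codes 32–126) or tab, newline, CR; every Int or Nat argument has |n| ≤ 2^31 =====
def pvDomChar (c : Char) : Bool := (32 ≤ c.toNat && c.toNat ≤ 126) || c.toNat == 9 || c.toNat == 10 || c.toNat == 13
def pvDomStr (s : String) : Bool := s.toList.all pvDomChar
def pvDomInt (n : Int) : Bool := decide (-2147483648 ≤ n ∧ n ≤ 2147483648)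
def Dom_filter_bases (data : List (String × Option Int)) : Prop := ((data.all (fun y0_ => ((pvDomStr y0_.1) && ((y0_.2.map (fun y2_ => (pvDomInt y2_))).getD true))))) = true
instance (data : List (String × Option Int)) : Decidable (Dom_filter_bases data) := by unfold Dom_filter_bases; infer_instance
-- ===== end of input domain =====

-- B replaces A's two-phase ancestor-prefix enumeration (split/join/pop into a 'bases' list,
-- then a membership filter) with a direct filter keeping k iff no key starts with k + '.'.  Objective: simpler.

-- ===== PORT A =====
-- the inner 'while parts: bases.append('.'.join(parts)); parts.pop()' loop
def basesLoop (parts : List String) (bases : List String) : List String :=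
  if h : parts = [] then bases
  else basesLoop parts.dropLast (bases ++ [PySem.Str.join "." parts])
termination_by parts.length
decreasing_by
  have := List.length_pos_iff.2 h
  simp only [List.length_dropLast]; omega

def filter_bases (data : List (String × Option Int)) : List (String × Option Int) :=
  let dotted := (data.map (fun kv => kv.1)).filter (fun k => PySem.Str.isIn "." k)
  -- for k in dotted: parts = k.split('.')[:-1]; while parts: …
  -- '.' is a nonempty separator, so Python's k.split('.') never raises: split? is 'some' here
  let bases := dotted.foldl (fun bases k =>
      basesLoop (PySem.List.slice ((PySem.Str.split? k ".").getD []) none (some (-1))) bases) []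
  data.filter (fun kv => !(bases.contains kv.1))

-- ===== PORT B =====
def filter_bases_alt (data : List (String × Option Int)) : List (String × Option Int) :=
  let dotted := (data.map (fun kv => kv.1)).filter (fun o => PySem.Str.isIn "." o)
  data.filter (fun kv => !(dotted.any (fun o => PySem.Str.startswith o (kv.1 ++ "."))))

-- ===== PRECONDITION & SPEC =====
def Spec_filter_bases (data : List (String × Option Int)) (out : List (String × Option Int)) : Prop := out = filter_bases_alt data
instance (data : List (String × Option Int)) (out : List (String × Option Int)) : Decidable (Spec_filter_bases data out) := by unfold Spec_filter_bases; infer_instance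

-- ===== CLAIM (what is proved, stated in full; the proofs are below) =====
def Claim_equal_filter_bases : Prop := ∀ (data : List (String × Option Int)), Dom_filter_bases data → Spec_filter_bases data (filter_bases data)

-- ===== LEMMAS AND PROOFS =====

-- structural model of PySem.Chars.splitOn on the single-char separator '.'
def msplit (pre : List Char) : List Char → List (List Char)
  | [] => [pre]
  | x :: t => if x = '.' then pre :: msplit [] t else msplit (pre ++ [x]) t


theorem splitOn_go_eq : ∀ (l : List Char) (fuel : Nat), l.length < fuel → ∀ (cur : List Char) (acc : List (List Char)),
    PySem.Chars.splitOn.go ['.'] fuel l cur acc = acc.reverse ++ msplit cur.reverse l := by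
  intro l
  induction l with
  | nil =>
    intro fuel hf cur acc
    rcases fuel with _ | fuel
    · omega
    · rw [PySem.Chars.splitOn.go] <;> simp [msplit]
  | cons x t ih =>
    intro fuel hf cur acc
    rcases fuel with _ | fuel
    · omega
    rw [PySem.Chars.splitOn.go]
    by_cases hx : x = '.'
    · subst hx
      rw [if_pos (by simp [List.isPrefixOf])]
      rw [show List.drop (['.'] : List Char).length ('.' :: t) = t from rfl]
      rw [ih fuel (by simp at hf ⊢; omega) [] (cur.reverse :: acc)]
      simp [msplit]
    · rw [if_neg (by simp [List.isPrefixOf]; exact fun h => absurd h.symm hx)]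
      rw [ih fuel (by simp at hf ⊢; omega) (x :: cur) acc]
      simp [msplit, hx]

theorem splitOn_eq_msplit (s : List Char) : PySem.Chars.splitOn s ['.'] = msplit [] s := by
  rw [PySem.Chars.splitOn, splitOn_go_eq s (s.length + 1) (by omega) [] []]
  simp

theorem msplit_ne_nil (l : List Char) : ∀ pre, msplit pre l ≠ [] := by
  induction l with
  | nil => intro pre; simp [msplit]
  | cons x t ih => intro pre; by_cases hx : x = '.' <;> simp [msplit, hx, ih]

theorem msplit_pre (l : List Char) : ∀ pre, msplit pre l = (pre ++ (msplit [] l).headI) :: (msplit [] l).tail := by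
  induction l with
  | nil => intro pre; simp [msplit]
  | cons x t ih =>
    intro pre
    by_cases hx : x = '.'
    · simp [msplit, hx]
    · simp only [msplit, if_neg hx]
      rw [ih (pre ++ [x]), ih ([] ++ [x])]
      simp

theorem join_cons_append (a b : List Char) (r : List (List Char)) :
    PySem.Chars.join ['.'] ((a ++ b) :: r) = a ++ PySem.Chars.join ['.'] (b :: r) := by
  cases r with
  | nil => rw [PySem.Chars.join_singleton, PySem.Chars.join_singleton]
  | cons c r' => rw [PySem.Chars.join_cons_cons, PySem.Chars.join_cons_cons]; simp

theorem msplit_prefix_iff (l : List Char) : ∀ kcs, (kcs ++ ['.'] <+: l) ↔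
    ∃ j, 1 ≤ j ∧ j < (msplit [] l).length ∧ kcs = PySem.Chars.join ['.'] ((msplit [] l).take j) := by
  induction l with
  | nil =>
    intro kcs
    constructor
    · intro h; exact absurd (List.prefix_nil.1 h) (by simp)
    · rintro ⟨j, h1, h2, -⟩; simp [msplit] at h2; omega
  | cons x t ih =>
    intro kcs
    have hT : msplit [] t ≠ [] := msplit_ne_nil t []
    obtain ⟨h0, tl, hTeq⟩ : ∃ h0 tl, msplit [] t = h0 :: tl := by
      cases hE : msplit [] t with
      | nil => exact absurd hE hT
      | cons a b => exact ⟨a, b, rfl⟩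
    by_cases hx : x = '.'
    · subst hx
      have hm : msplit [] ('.' :: t) = [] :: msplit [] t := by simp [msplit]
      rw [hm]
      cases kcs with
      | nil =>
        simp only [List.nil_append, List.cons_prefix_cons, List.nil_prefix, and_true, true_iff]
        exact ⟨1, le_refl 1, by simp [hTeq], by rw [List.take_succ_cons, List.take_zero, PySem.Chars.join_singleton]⟩
      | cons k0 ks =>
        rw [List.cons_append, List.cons_prefix_cons]
        constructor
        · rintro ⟨rfl, hp⟩
          obtain ⟨j, hj1, hj2, hj3⟩ := (ih ks).1 hp
          refine ⟨j + 1, by omega, by simp; omega, ?_⟩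
          rw [List.take_succ_cons]
          have hne : (msplit [] t).take j ≠ [] := by
            simp [hTeq]; omega
          obtain ⟨c, r', hcr⟩ : ∃ c r', (msplit [] t).take j = c :: r' := by
            cases hE : (msplit [] t).take j with
            | nil => exact absurd hE hne
            | cons a b => exact ⟨a, b, rfl⟩
          rw [hcr, PySem.Chars.join_cons_cons]
          simp [hj3, hcr]
        · rintro ⟨j, hj1, hj2, hj3⟩
          rcases j with _ | j'
          · omega
          rcases j' with _ | j''
          · rw [List.take_succ_cons, List.take_zero, PySem.Chars.join_singleton] at hj3
            exact absurd hj3 (by simp)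
          · rw [List.take_succ_cons] at hj3
            obtain ⟨c, r', hcr⟩ : ∃ c r', (msplit [] t).take (j'' + 1) = c :: r' := by
              rw [hTeq, List.take_succ_cons]; exact ⟨_, _, rfl⟩
            rw [hcr, PySem.Chars.join_cons_cons] at hj3
            simp only [List.nil_append, List.singleton_append, List.cons.injEq] at hj3
            obtain ⟨rfl, hks⟩ := hj3
            refine ⟨rfl, (ih ks).2 ⟨j'' + 1, by omega, by simp at hj2 ⊢; omega, by rw [hcr, hks]⟩⟩
    · have hm : msplit [] (x :: t) = (x :: h0) :: tl := by
        simp only [msplit, if_neg hx]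
        rw [msplit_pre t ([] ++ [x])]
        simp [hTeq]
      rw [hm]
      have hlen : tl.length + 1 = (msplit [] t).length := by simp [hTeq]
      have hjoin : ∀ j, PySem.Chars.join ['.'] (((x :: h0) :: tl).take (j + 1))
          = x :: PySem.Chars.join ['.'] ((msplit [] t).take (j + 1)) := by
        intro j
        rw [List.take_succ_cons, hTeq, List.take_succ_cons]
        have := join_cons_append [x] h0 (tl.take j)
        simpa using this
      cases kcs with
      | nil =>
        simp only [List.nil_append, List.cons_prefix_cons]
        constructor
        · rintro ⟨h, -⟩; exact absurd h.symm hx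
        · rintro ⟨j, hj1, hj2, hj3⟩
          rcases j with _ | j'
          · omega
          rw [hjoin j'] at hj3
          exact absurd hj3 (by simp)
      | cons k0 ks =>
        rw [List.cons_append, List.cons_prefix_cons]
        constructor
        · rintro ⟨rfl, hp⟩
          obtain ⟨j, hj1, hj2, hj3⟩ := (ih ks).1 hp
          rcases j with _ | j'
          · omega
          refine ⟨j' + 1, by omega, by simp; omega, ?_⟩
          rw [hjoin j', ← hj3]
        · rintro ⟨j, hj1, hj2, hj3⟩
          rcases j with _ | j'
          · omega
          rw [hjoin j'] at hj3
          simp only [List.cons.injEq] at hj3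
          obtain ⟨rfl, hks⟩ := hj3
          exact ⟨rfl, (ih ks).2 ⟨j' + 1, by omega, by simp at hj2 ⊢; omega, hks⟩⟩
theorem basesLoop_nil (acc : List String) : basesLoop [] acc = acc := by
  rw [basesLoop]; simp

theorem basesLoop_ne (parts : List String) (h : parts ≠ []) (acc : List String) :
    basesLoop parts acc = basesLoop parts.dropLast (acc ++ [PySem.Str.join "." parts]) := by
  conv_lhs => rw [basesLoop]
  rw [dif_neg h]

theorem basesLoop_acc : ∀ (n : Nat) (parts : List String), parts.length ≤ n →
    ∀ acc, basesLoop parts acc = acc ++ basesLoop parts [] := by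
  intro n
  induction n with
  | zero =>
    intro parts hp acc
    have : parts = [] := List.length_eq_zero_iff.1 (by omega)
    subst this; rw [basesLoop_nil, basesLoop_nil]; simp
  | succ n ih =>
    intro parts hp acc
    by_cases h : parts = []
    · subst h; rw [basesLoop_nil, basesLoop_nil]; simp
    · have hd : parts.dropLast.length = parts.length - 1 := List.length_dropLast
      have hpos := List.length_pos_iff.2 h
      have hlen : parts.dropLast.length ≤ n := by omega
      rw [basesLoop_ne parts h, basesLoop_ne parts h,
        ih parts.dropLast hlen (acc ++ [PySem.Str.join "." parts]),
        ih parts.dropLast hlen ([] ++ [PySem.Str.join "." parts])]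
      simp

theorem mem_basesLoop : ∀ (n : Nat) (parts : List String), parts.length ≤ n →
    ∀ k, k ∈ basesLoop parts [] ↔
      ∃ j, 1 ≤ j ∧ j ≤ parts.length ∧ k = PySem.Str.join "." (parts.take j) := by
  intro n
  induction n with
  | zero =>
    intro parts hp k
    have : parts = [] := List.length_eq_zero_iff.1 (by omega)
    subst this; rw [basesLoop_nil]; simp
  | succ n ih =>
    intro parts hp k
    by_cases h : parts = []
    · subst h; rw [basesLoop_nil]; simp
    · have hd : parts.dropLast.length = parts.length - 1 := List.length_dropLast
      have hpos := List.length_pos_iff.2 h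
      have hlen : parts.dropLast.length ≤ n := by omega
      rw [basesLoop_ne parts h,
        basesLoop_acc n parts.dropLast hlen ([] ++ [PySem.Str.join "." parts])]
      simp only [List.nil_append, List.singleton_append, List.mem_cons]
      rw [ih parts.dropLast hlen k]
      constructor
      · rintro (rfl | ⟨j, hj1, hj2, hj3⟩)
        · exact ⟨parts.length, by omega, le_refl _, by rw [List.take_length]⟩
        · refine ⟨j, hj1, by omega, ?_⟩
          rw [hj3, List.dropLast_eq_take, List.take_take, Nat.min_eq_left (by omega)]
      · rintro ⟨j, hj1, hj2, hj3⟩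
        by_cases hj : j = parts.length
        · subst hj; left; rw [hj3, List.take_length]
        · right
          refine ⟨j, hj1, by omega, ?_⟩
          rw [hj3, List.dropLast_eq_take, List.take_take, Nat.min_eq_left (by omega)]

theorem mem_basesOf (o k : String) :
    (k ∈ basesLoop (PySem.List.slice ((PySem.Str.split? o ".").getD []) none (some (-1))) [])
      ↔ k.toList ++ ['.'] <+: o.toList := by
  have hdot : ("." : String).toList = ['.'] := rfl
  have h1 := PySem.Str.split?_map o "."
  rw [hdot] at h1
  have h2 : PySem.Chars.split? o.toList ['.'] = some (msplit [] o.toList) := by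
    rw [PySem.Chars.split?]
    simp [splitOn_eq_msplit]
  rw [h2] at h1
  obtain ⟨P, hP, hmap⟩ : ∃ P, PySem.Str.split? o "." = some P ∧ P.map String.toList = msplit [] o.toList := by
    cases hE : PySem.Str.split? o "." with
    | none => rw [hE] at h1; simp at h1
    | some P => rw [hE] at h1; simp at h1; exact ⟨P, rfl, h1⟩
  rw [hP, Option.getD_some, PySem.List.slice_to_neg_one,
    mem_basesLoop P.dropLast.length P.dropLast (le_refl _) k,
    msplit_prefix_iff o.toList k.toList]
  have hM : msplit [] o.toList ≠ [] := msplit_ne_nil o.toList []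
  have hlen : P.length = (msplit [] o.toList).length := by rw [← hmap, List.length_map]
  have hpos : 1 ≤ (msplit [] o.toList).length := List.length_pos_iff.2 hM
  have hdl : P.dropLast.length = P.length - 1 := List.length_dropLast
  constructor
  · rintro ⟨j, hj1, hj2, hj3⟩
    refine ⟨j, hj1, by omega, ?_⟩
    rw [hj3, PySem.Str.toList_join, hdot, List.dropLast_eq_take, List.take_take,
      Nat.min_eq_left (by omega), List.map_take, hmap]
  · rintro ⟨j, hj1, hj2, hj3⟩
    refine ⟨j, hj1, by omega, ?_⟩
    rw [← String.toList_inj, hj3, PySem.Str.toList_join, hdot, List.dropLast_eq_take,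
      List.take_take, Nat.min_eq_left (by omega), List.map_take, hmap]

theorem mem_bases (data : List (String × Option Int)) (k : String) :
    (k ∈ ((data.map (fun kv => kv.1)).filter (fun s => PySem.Str.isIn "." s)).foldl
      (fun bases o => basesLoop (PySem.List.slice ((PySem.Str.split? o ".").getD []) none (some (-1))) bases) [])
      ↔ ∃ kv ∈ data, k.toList ++ ['.'] <+: kv.1.toList := by
  rw [PySem.List.foldl_congr_mem _ _
      (fun acc o => acc ++ basesLoop (PySem.List.slice ((PySem.Str.split? o ".").getD []) none (some (-1))) []) []
      (fun acc o _ => basesLoop_acc _ _ (le_refl _) acc),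
    PySem.List.foldl_append_eq_flatMap]
  simp only [List.nil_append, List.mem_flatMap, List.mem_filter, List.mem_map]
  constructor
  · rintro ⟨o, ⟨⟨kv, hkv, rfl⟩, -⟩, hmem⟩
    exact ⟨kv, hkv, (mem_basesOf kv.1 k).1 hmem⟩
  · rintro ⟨kv, hkv, hpfx⟩
    refine ⟨kv.1, ⟨⟨kv, hkv, rfl⟩, ?_⟩, (mem_basesOf kv.1 k).2 hpfx⟩
    rw [PySem.Str.isIn_iff_infix]
    exact ((List.suffix_append k.toList ['.']).isInfix).trans hpfx.isInfix

theorem any_startswith (data : List (String × Option Int)) (k : String) :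
    (((data.map (fun kv => kv.1)).filter (fun o => PySem.Str.isIn "." o)).any
        (fun o => PySem.Str.startswith o (k ++ "."))) = true
      ↔ ∃ kv ∈ data, k.toList ++ ['.'] <+: kv.1.toList := by
  rw [List.any_eq_true]
  simp only [List.mem_filter, List.mem_map]
  constructor
  · rintro ⟨o, ⟨⟨kv, hkv, rfl⟩, -⟩, hsw⟩
    rw [PySem.Str.startswith_eq] at hsw
    have := (PySem.Chars.startswith_iff _ _).1 hsw
    rw [String.toList_append] at this
    exact ⟨kv, hkv, this⟩
  · rintro ⟨kv, hkv, hpfx⟩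
    refine ⟨kv.1, ⟨⟨kv, hkv, rfl⟩, ?_⟩, ?_⟩
    · rw [PySem.Str.isIn_iff_infix]
      exact ((List.suffix_append k.toList ['.']).isInfix).trans hpfx.isInfix
    · rw [PySem.Str.startswith_eq, PySem.Chars.startswith_iff, String.toList_append]
      exact hpfx

-- ===== VERDICT (by name: the statement is the Claim_ definition above) =====
theorem filter_bases_spec : Claim_equal_filter_bases := by
  intro data _
  unfold Spec_filter_bases filter_bases filter_bases_alt
  apply List.filter_congr
  intro kv hkv
  apply congrArg (fun b => !b)
  rw [Bool.eq_iff_iff, List.contains_iff_mem, mem_bases data kv.1, ← any_startswith data kv.1]
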